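-- pv_equiv track=rewrite | github.com/josephcappadona/poker-data-mining | src/features.py | find_PFCs
-- ===== SOURCE A (Python) =====
-- def find_PFCs(preflop_action):
--     PFCs = []
--     for username, action in preflop_action[::-1]:
--         if action.startswith('raises'):
--             break
--         elif action.startswith('calls'):
--             PFCs.append(username)
--     return PFCs
-- ===== SOURCE B (Python) =====
-- def find_PFCs(preflop_action):
--     # single forward pass: reset the segment at every raise, collect callers;
--     # reverse at the end to match A's reverse-scan order
--     seg = []
--     for username, action in preflop_action:
--         if action.startswith('raises'):
--             seg = []
--         elif action.startswith('calls'):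
--             seg.append(username)
--     return seg[::-1]
-- ===== Notes on version B (the rewrite author's own statement) =====
-- stated objective: alternative
-- what changed: A scans the list in reverse and breaks at the first raise; B makes one forward pass that resets its accumulator at every raise and collects callers, reversing the result at the end.
import Mathlib
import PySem

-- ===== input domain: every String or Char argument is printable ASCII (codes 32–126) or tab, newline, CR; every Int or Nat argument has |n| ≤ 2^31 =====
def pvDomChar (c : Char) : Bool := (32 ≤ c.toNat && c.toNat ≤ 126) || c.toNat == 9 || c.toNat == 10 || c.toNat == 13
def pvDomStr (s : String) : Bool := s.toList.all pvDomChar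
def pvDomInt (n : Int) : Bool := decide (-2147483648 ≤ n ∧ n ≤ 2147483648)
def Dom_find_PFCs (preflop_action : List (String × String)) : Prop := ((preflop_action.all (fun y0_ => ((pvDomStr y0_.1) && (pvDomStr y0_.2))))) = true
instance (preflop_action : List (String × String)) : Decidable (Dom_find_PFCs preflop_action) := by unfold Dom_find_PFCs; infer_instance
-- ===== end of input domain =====

-- B replaces A's reverse scan with break by a single forward pass that resets its accumulator at each raise (objective: alternative decomposition, same O(n) cost).


-- ===== PORT A =====
-- loop over preflop_action[::-1] with break at the first 'raises'; acc is PFCs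
def pvLoopA : List (String × String) → List String → List String
  | [], acc => acc
  | (username, action) :: rest, acc =>
    if PySem.Str.startswith action "raises" then acc
    else if PySem.Str.startswith action "calls" then pvLoopA rest (acc ++ [username])
    else pvLoopA rest acc

-- preflop_action[::-1] is list reversal (PySem.List.slice?_none_none_neg_one)
def find_PFCs (preflop_action : List (String × String)) : List String :=
  pvLoopA preflop_action.reverse []

-- ===== PORT B =====
-- B: one forward pass; seg resets at every raise, collects callers; reversed at the end
def pvStepB (seg : List String) (p : String × String) : List String :=
  if PySem.Str.startswith p.2 "raises" then []
  else if PySem.Str.startswith p.2 "calls" then seg ++ [p.1]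
  else seg

def find_PFCs_alt (preflop_action : List (String × String)) : List String :=
  (preflop_action.foldl pvStepB []).reverse

-- ===== PRECONDITION & SPEC =====
def Spec_find_PFCs (preflop_action : List (String × String)) (out : List String) : Prop := out = find_PFCs_alt preflop_action
instance (preflop_action : List (String × String)) (out : List String) : Decidable (Spec_find_PFCs preflop_action out) := by unfold Spec_find_PFCs; infer_instance

-- ===== CLAIM (what is proved, stated in full; the proofs are below) =====
def Claim_equal_find_PFCs : Prop := ∀ (preflop_action : List (String × String)), Dom_find_PFCs preflop_action → Spec_find_PFCs preflop_action (find_PFCs preflop_action)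

-- ===== LEMMAS AND PROOFS =====
-- canonical value: callers collected from ys (a reversed action list) up to the first raise
def pvT (ys : List (String × String)) : List String :=
  ((ys.takeWhile (fun p => !PySem.Str.startswith p.2 "raises")).filter
      (fun p => PySem.Str.startswith p.2 "calls")).map Prod.fst

theorem pvLoopA_eq (ys : List (String × String)) (acc : List String) :
    pvLoopA ys acc = acc ++ pvT ys := by
  induction ys generalizing acc with
  | nil => simp [pvLoopA, pvT]
  | cons p rest ih =>
    obtain ⟨u, a⟩ := p
    by_cases hr : PySem.Str.startswith a "raises" = true
    · simp at hr; simp [pvLoopA, pvT, hr]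
    · by_cases hc : PySem.Str.startswith a "calls" = true
      · simp at hr hc; simp [pvLoopA, pvT, hr, hc, ih]
      · simp at hr hc; simp [pvLoopA, pvT, hr, hc, ih]

theorem pvFoldB_eq (xs : List (String × String)) (seg : List String) :
    xs.foldl pvStepB seg =
      (if xs.any (fun p => PySem.Str.startswith p.2 "raises") then [] else seg)
        ++ (pvT xs.reverse).reverse := by
  induction xs using List.reverseRecOn generalizing seg with
  | nil => simp [pvT]
  | append_singleton xs p ih =>
    obtain ⟨u, a⟩ := p
    by_cases hr : PySem.Str.startswith a "raises" = true
    · simp at hr; simp [pvStepB, hr, pvT]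
    · by_cases hc : PySem.Str.startswith a "calls" = true
      · simp at hr hc
        simp [pvStepB, hr, hc, pvT, ih]
        simp only [List.any_append, List.any_cons, List.any_nil, hr, Bool.or_false]
        split <;> rfl
      · simp at hr hc
        simp [pvStepB, hr, hc, pvT, ih]
        simp only [List.any_append, List.any_cons, List.any_nil, hr, Bool.or_false]
        split <;> rfl

-- ===== VERDICT (by name: the statement is the Claim_ definition above) =====
theorem find_PFCs_spec : Claim_equal_find_PFCs := by
  intro xs _
  unfold Spec_find_PFCs find_PFCs find_PFCs_alt
  rw [pvFoldB_eq, pvLoopA_eq]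
  split <;> simp
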